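-- pv_equiv track=rewrite | github.com/muccimoz/BacklogRefinementAdvisor | app.py | _render_outcome_count_bar_html
-- ===== SOURCE A (Python) =====
-- def _render_outcome_count_bar_html(items: list) -> str:
--     outcome_config = [
--         ("Ready for Sprint",        "#27ae60"),
--         ("Needs More Refinement",   "#2980b9"),
--         ("Return to Product Owner", "#e67e22"),
--         ("Defer",                   "#7f8c8d"),
--         ("Split Required",          "#8e44ad"),
--     ]
--     counts = {}
--     for item in items:
--         key = item.get("outcome") or ""
--         counts[key] = counts.get(key, 0) + 1
--
--     html = '<div style="display:flex;gap:10px;flex-wrap:wrap;margin-bottom:4px">'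
--     for label, color in outcome_config:
--         n = counts.get(label, 0)
--         html += (
--             f'<div style="display:flex;align-items:center;gap:8px;background:#fff;'
--             f'border-radius:8px;padding:10px 16px;border:1px solid #e0e3e8;min-width:150px">'
--             f'<div style="width:10px;height:10px;border-radius:50%;background:{color};flex-shrink:0"></div>'
--             f'<div><div style="font-size:20px;font-weight:700;color:{color}">{n}</div>'
--             f'<div style="font-size:11px;color:#888">{label}</div></div></div>'
--         )
--     pending = counts.get("", 0)
--     if pending:
--         html += (
--             f'<div style="display:flex;align-items:center;gap:8px;background:#fff;'
--             f'border-radius:8px;padding:10px 16px;border:1px solid #e0e3e8;min-width:100px">'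
--             f'<div style="width:10px;height:10px;border-radius:50%;background:#bdc3c7;flex-shrink:0"></div>'
--             f'<div><div style="font-size:20px;font-weight:700;color:#aaa">{pending}</div>'
--             f'<div style="font-size:11px;color:#888">Pending</div></div></div>'
--         )
--     html += '</div>'
--     return html
-- ===== SOURCE B (Python) =====
-- def _render_outcome_count_bar_html(items: list) -> str:
--     outcome_config = [
--         ("Ready for Sprint",        "#27ae60"),
--         ("Needs More Refinement",   "#2980b9"),
--         ("Return to Product Owner", "#e67e22"),
--         ("Defer",                   "#7f8c8d"),
--         ("Split Required",          "#8e44ad"),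
--     ]
--     cards = "".join(
--         f'<div style="display:flex;align-items:center;gap:8px;background:#fff;'
--         f'border-radius:8px;padding:10px 16px;border:1px solid #e0e3e8;min-width:150px">'
--         f'<div style="width:10px;height:10px;border-radius:50%;background:{color};flex-shrink:0"></div>'
--         f'<div><div style="font-size:20px;font-weight:700;color:{color}">'
--         f'{sum(1 for item in items if (item.get("outcome") or "") == label)}</div>'
--         f'<div style="font-size:11px;color:#888">{label}</div></div></div>'
--         for label, color in outcome_config
--     )
--     pending = sum(1 for item in items if (item.get("outcome") or "") == "")
--     tail = (
--         f'<div style="display:flex;align-items:center;gap:8px;background:#fff;'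
--         f'border-radius:8px;padding:10px 16px;border:1px solid #e0e3e8;min-width:100px">'
--         f'<div style="width:10px;height:10px;border-radius:50%;background:#bdc3c7;flex-shrink:0"></div>'
--         f'<div><div style="font-size:20px;font-weight:700;color:#aaa">{pending}</div>'
--         f'<div style="font-size:11px;color:#888">Pending</div></div></div>'
--     ) if pending else ""
--     return ('<div style="display:flex;gap:10px;flex-wrap:wrap;margin-bottom:4px">'
--             + cards + tail + '</div>')
-- ===== Notes on version B (the rewrite author's own statement) =====
-- stated objective: alternative
-- what changed: Replaces the single-pass counter dict with a direct per-category count (sum of a generator per label, and one for pending) and builds the bar by joining per-category card strings instead of accumulating html in a loop.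
import Mathlib
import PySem

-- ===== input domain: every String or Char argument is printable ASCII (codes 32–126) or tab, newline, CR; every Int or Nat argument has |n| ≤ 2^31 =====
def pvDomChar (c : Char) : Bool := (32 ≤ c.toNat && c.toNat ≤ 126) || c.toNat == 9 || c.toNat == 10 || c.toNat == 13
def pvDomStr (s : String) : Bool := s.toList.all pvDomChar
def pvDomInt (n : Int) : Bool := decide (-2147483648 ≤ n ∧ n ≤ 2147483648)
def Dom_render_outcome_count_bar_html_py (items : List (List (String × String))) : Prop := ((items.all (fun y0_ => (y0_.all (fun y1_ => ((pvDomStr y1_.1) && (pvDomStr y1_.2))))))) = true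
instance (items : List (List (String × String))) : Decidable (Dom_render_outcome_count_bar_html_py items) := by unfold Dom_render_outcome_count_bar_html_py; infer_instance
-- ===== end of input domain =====

-- B replaces A's counter-dict pass with a per-category direct count and a join of card strings (alternative decomposition; same HTML).


-- shared helpers: the key normalization `item.get("outcome") or ""` and the literal HTML fragments (identical in both Pythons)
def pvKey (item : List (String × String)) : String :=
  match (PySem.Dict.mk item).get? "outcome" with
  | some s => if s == "" then "" else s
  | none => ""

def pvConfig : List (String × String) :=
  [("Ready for Sprint", "#27ae60"), ("Needs More Refinement", "#2980b9"),
   ("Return to Product Owner", "#e67e22"), ("Defer", "#7f8c8d"), ("Split Required", "#8e44ad")]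

def pvCard (label color : String) (n : Int) : String :=
  "<div style=\"display:flex;align-items:center;gap:8px;background:#fff;border-radius:8px;padding:10px 16px;border:1px solid #e0e3e8;min-width:150px\"><div style=\"width:10px;height:10px;border-radius:50%;background:" ++ color ++ ";flex-shrink:0\"></div><div><div style=\"font-size:20px;font-weight:700;color:" ++ color ++ "\">" ++ PySem.Int.toStr n ++ "</div><div style=\"font-size:11px;color:#888\">" ++ label ++ "</div></div></div>"

def pvPendingCard (pending : Int) : String :=
  "<div style=\"display:flex;align-items:center;gap:8px;background:#fff;border-radius:8px;padding:10px 16px;border:1px solid #e0e3e8;min-width:100px\"><div style=\"width:10px;height:10px;border-radius:50%;background:#bdc3c7;flex-shrink:0\"></div><div><div style=\"font-size:20px;font-weight:700;color:#aaa\">" ++ PySem.Int.toStr pending ++ "</div><div style=\"font-size:11px;color:#888\">Pending</div></div></div>"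

def pvHeader : String := "<div style=\"display:flex;gap:10px;flex-wrap:wrap;margin-bottom:4px\">"

-- ===== PORT A =====
def render_outcome_count_bar_html_py (items : List (List (String × String))) : String :=
  let counts : PySem.Dict String Int :=
    items.foldl (fun d item => d.insert (pvKey item) (d.getD (pvKey item) 0 + 1)) PySem.Dict.empty
  let html :=
    pvConfig.foldl (fun h lc => h ++ pvCard lc.1 lc.2 (counts.getD lc.1 0)) pvHeader
  let pending := counts.getD "" 0
  let html := if pending ≠ 0 then html ++ pvPendingCard pending else html
  html ++ "</div>"

-- ===== PORT B =====
def render_outcome_count_bar_html_py_alt (items : List (List (String × String))) : String :=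
  let cards := String.join (pvConfig.map (fun lc =>
    pvCard lc.1 lc.2 ((items.countP (fun item => pvKey item == lc.1) : Nat) : Int)))
  let pending : Int := ((items.countP (fun item => pvKey item == "") : Nat) : Int)
  let tail := if pending ≠ 0 then pvPendingCard pending else ""
  pvHeader ++ cards ++ tail ++ "</div>"

-- ===== PRECONDITION & SPEC =====
def Spec_render_outcome_count_bar_html_py (items : List (List (String × String))) (out : String) : Prop := out = render_outcome_count_bar_html_py_alt items
instance (items : List (List (String × String))) (out : String) : Decidable (Spec_render_outcome_count_bar_html_py items out) := by unfold Spec_render_outcome_count_bar_html_py; infer_instance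

-- ===== CLAIM (what is proved, stated in full; the proofs are below) =====
def Claim_equal_render_outcome_count_bar_html_py : Prop := ∀ (items : List (List (String × String))), Dom_render_outcome_count_bar_html_py items → Spec_render_outcome_count_bar_html_py items (render_outcome_count_bar_html_py items)

-- ===== LEMMAS AND PROOFS =====

-- A's counter-dict lookup is B's direct count
lemma pv_counts_getD (items : List (List (String × String))) (v : String) :
    (items.foldl (fun d item => d.insert (pvKey item) (d.getD (pvKey item) 0 + 1))
        (PySem.Dict.empty : PySem.Dict String Int)).getD v 0
      = ((items.countP (fun item => pvKey item == v) : Nat) : Int) := by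
  have h : items.foldl (fun d item => d.insert (pvKey item) (d.getD (pvKey item) 0 + 1))
        (PySem.Dict.empty : PySem.Dict String Int)
      = (items.map pvKey).foldl (fun d x => d.insert x (d.getD x 0 + 1)) PySem.Dict.empty := by
    rw [List.foldl_map]
  rw [h, PySem.Dict.getD_foldl_insert_add_one, PySem.Dict.getD_empty]
  rw [List.count_eq_countP, List.countP_map]
  simp only [zero_add]; rfl

-- ===== VERDICT (by name: the statement is the Claim_ definition above) =====
theorem render_outcome_count_bar_html_py_spec : Claim_equal_render_outcome_count_bar_html_py := by
  intro items _
  show _ = _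
  unfold render_outcome_count_bar_html_py render_outcome_count_bar_html_py_alt
  simp only [pv_counts_getD, pvConfig, List.foldl, List.map, String.join]
  split_ifs with h
  · simp [String.append_assoc]
  · simp [String.append_assoc]
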